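-- pv_equiv track=rewrite | github.com/CYB3R-BO1/SPIDER | agents/cgen_agent.py | _build_cfg
-- ===== SOURCE A (Python) =====
-- from typing import Dict, List, Optional, Set, Tuple
--
-- def _build_cfg(
--     blocks: List[int], edges: List[Tuple[int, int]]
-- ) -> Tuple[Dict[int, Set[int]], Dict[int, Set[int]]]:
--     preds = {b: set() for b in blocks}
--     succs = {b: set() for b in blocks}
--     for src, dst in edges:
--         if src in succs and dst in preds:
--             succs[src].add(dst)
--             preds[dst].add(src)
--     return preds, succs
-- ===== SOURCE B (Python) =====
-- # Declarative re-implementation: filter the valid edges once, then build each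
-- # adjacency map by grouping comprehensions (no mutation of dict entries).
-- from typing import Dict, List, Set, Tuple
--
-- def _build_cfg(
--     blocks: List[int], edges: List[Tuple[int, int]]
-- ) -> Tuple[Dict[int, Set[int]], Dict[int, Set[int]]]:
--     bs = set(blocks)
--     valid = [(s, d) for s, d in edges if s in bs and d in bs]
--     preds = {b: {s for s, d in valid if d == b} for b in blocks}
--     succs = {b: {d for s, d in valid if s == b} for b in blocks}
--     return preds, succs
-- ===== Notes on version B (the rewrite author's own statement) =====
-- stated objective: alternative
-- what changed: Replaces A's single mutating edge loop (initialize both dicts, then add endpoints of each valid edge in place) with a declarative two-phase build: filter the valid edges once, then construct preds and succs directly by per-block grouping comprehensions; it trades A's O(V+E) incremental update for grouping scans.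
import Mathlib
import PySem

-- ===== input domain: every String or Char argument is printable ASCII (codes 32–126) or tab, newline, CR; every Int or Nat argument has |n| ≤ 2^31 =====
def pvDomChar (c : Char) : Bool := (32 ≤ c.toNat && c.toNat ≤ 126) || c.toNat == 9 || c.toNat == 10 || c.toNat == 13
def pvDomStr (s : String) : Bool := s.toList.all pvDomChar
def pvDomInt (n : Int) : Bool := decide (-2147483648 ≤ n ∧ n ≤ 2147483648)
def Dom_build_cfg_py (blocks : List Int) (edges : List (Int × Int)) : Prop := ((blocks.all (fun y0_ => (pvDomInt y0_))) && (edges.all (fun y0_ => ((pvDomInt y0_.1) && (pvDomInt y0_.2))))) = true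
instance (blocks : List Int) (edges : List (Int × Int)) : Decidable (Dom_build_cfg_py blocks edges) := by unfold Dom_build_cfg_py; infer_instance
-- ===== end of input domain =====

-- B builds the maps by filter-then-group comprehensions instead of A's mutating edge loop (alternative decomposition, same results).


-- ===== PORT A =====
-- literal transliteration of A: init preds/succs to empty sets for each block,
-- then one fold over edges adding both endpoints of each valid edge in place.
def build_cfg_py (blocks : List Int) (edges : List (Int × Int)) :
    (List (Int × List Int)) × (List (Int × List Int)) :=
  let preds0 : PySem.Dict Int (PySem.Set Int) :=
    blocks.foldl (fun d b => d.insert b PySem.Set.empty) PySem.Dict.empty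
  let succs0 : PySem.Dict Int (PySem.Set Int) :=
    blocks.foldl (fun d b => d.insert b PySem.Set.empty) PySem.Dict.empty
  let st := edges.foldl
    (fun (st : PySem.Dict Int (PySem.Set Int) × PySem.Dict Int (PySem.Set Int)) e =>
      if st.2.contains e.1 && st.1.contains e.2 then
        (st.1.modify e.2 PySem.Set.empty (fun s => PySem.Set.add s e.1),
         st.2.modify e.1 PySem.Set.empty (fun s => PySem.Set.add s e.2))
      else st)
    (preds0, succs0)
  (st.1.items, st.2.items)

-- ===== PORT B =====
-- literal transliteration of B: filter valid edges once, then build each map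
-- by per-block grouping set-comprehensions.
def build_cfg_py_alt (blocks : List Int) (edges : List (Int × Int)) :
    (List (Int × List Int)) × (List (Int × List Int)) :=
  let bs : PySem.Set Int := PySem.Set.ofList blocks
  let valid := edges.filter (fun e => bs.contains e.1 && bs.contains e.2)
  let preds : PySem.Dict Int (PySem.Set Int) :=
    blocks.foldl (fun d b =>
      d.insert b (PySem.Set.ofList ((valid.filter (fun e => e.2 == b)).map (·.1)))) PySem.Dict.empty
  let succs : PySem.Dict Int (PySem.Set Int) :=
    blocks.foldl (fun d b =>
      d.insert b (PySem.Set.ofList ((valid.filter (fun e => e.1 == b)).map (·.2)))) PySem.Dict.empty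
  (preds.items, succs.items)

-- ===== PRECONDITION & SPEC =====
def Spec_build_cfg_py (blocks : List Int) (edges : List (Int × Int)) (out : (List (Int × List Int)) × (List (Int × List Int))) : Prop := out = build_cfg_py_alt blocks edges
instance (blocks : List Int) (edges : List (Int × Int)) (out : (List (Int × List Int)) × (List (Int × List Int))) : Decidable (Spec_build_cfg_py blocks edges out) := by unfold Spec_build_cfg_py; infer_instance

-- ===== CLAIM (what is proved, stated in full; the proofs are below) =====
def Claim_equal_build_cfg_py : Prop := ∀ (blocks : List Int) (edges : List (Int × Int)), Dom_build_cfg_py blocks edges → Spec_build_cfg_py blocks edges (build_cfg_py blocks edges)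

-- ===== LEMMAS AND PROOFS =====

-- A "table" dict: one entry per distinct block, with value f b.
def mkTab (blocks : List Int) (f : Int → PySem.Set Int) : PySem.Dict Int (PySem.Set Int) :=
  blocks.foldl (fun d b => d.insert b (f b)) PySem.Dict.empty

theorem keys_mkTab (blocks : List Int) (f : Int → PySem.Set Int) :
    (mkTab blocks f).keys = PySem.Set.ofList blocks := by
  unfold mkTab
  rw [PySem.Dict.keys_foldl_insert blocks (fun _ b => f b) PySem.Dict.empty]
  simp [PySem.Set.update_nil_left]

theorem contains_mkTab (blocks : List Int) (f : Int → PySem.Set Int) (x : Int) :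
    (mkTab blocks f).contains x = decide (x ∈ blocks) := by
  by_cases h : x ∈ blocks
  · simp [h]
    rw [PySem.Dict.contains_iff_mem_keys, keys_mkTab]
    exact (PySem.Set.mem_ofList blocks x).2 h
  · simp [h]
    rw [← Bool.not_eq_true, PySem.Dict.contains_iff_mem_keys, keys_mkTab]
    intro hm
    exact h ((PySem.Set.mem_ofList blocks x).1 hm)

theorem items_mkTab (blocks : List Int) (f : Int → PySem.Set Int) :
    (mkTab blocks f).items = (PySem.Set.ofList blocks).map (fun b => (b, f b)) := by
  induction blocks using List.reverseRecOn with
  | nil => rfl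
  | append_singleton xs x ih =>
    have hstep : mkTab (xs ++ [x]) f = (mkTab xs f).insert x (f x) := by
      unfold mkTab; rw [List.foldl_append]; rfl
    rw [hstep, PySem.Set.ofList_append_singleton]
    by_cases h : x ∈ xs
    · have hc : (mkTab xs f).contains x = true := by
        rw [contains_mkTab xs f x]; simp [h]
      rw [PySem.Dict.items_insert_of_contains _ (f x) hc, ih]
      have hadd : (PySem.Set.ofList xs).add x = PySem.Set.ofList xs :=
        PySem.Set.add_of_mem ((PySem.Set.mem_ofList xs x).2 h)
      rw [hadd, List.map_map]
      apply List.map_congr_left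
      intro b _
      by_cases hb : b = x <;> simp [hb]
    · have hc : (mkTab xs f).contains x = false := by
        rw [contains_mkTab xs f x]; simp [h]
      rw [PySem.Dict.items_insert_of_not_contains _ (f x) hc, ih]
      have hadd : (PySem.Set.ofList xs).add x = PySem.Set.ofList xs ++ [x] := by
        apply PySem.Set.add_of_not_mem
        intro hm; exact h ((PySem.Set.mem_ofList xs x).1 hm)
      rw [hadd]
      simp

theorem mkTab_congr (blocks : List Int) (f g : Int → PySem.Set Int)
    (h : ∀ b ∈ blocks, f b = g b) : mkTab blocks f = mkTab blocks g := by
  apply PySem.Dict.ext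
  rw [items_mkTab, items_mkTab]
  apply List.map_congr_left
  intro b hb
  rw [h b ((PySem.Set.mem_ofList blocks b).1 hb)]

theorem getD_mkTab (blocks : List Int) (f : Int → PySem.Set Int) (x : Int)
    (h : x ∈ blocks) (d0 : PySem.Set Int) : (mkTab blocks f).getD x d0 = f x := by
  apply PySem.Dict.getD_of_mem_items
  · rw [items_mkTab]
    exact List.mem_map_of_mem ((PySem.Set.mem_ofList blocks x).2 h)
  · rw [keys_mkTab]
    exact PySem.Set.nodup_ofList blocks

theorem insert_mkTab (blocks : List Int) (f : Int → PySem.Set Int) (x : Int)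
    (h : x ∈ blocks) (v : PySem.Set Int) :
    (mkTab blocks f).insert x v = mkTab blocks (fun b => if b = x then v else f b) := by
  apply PySem.Dict.ext
  have hc : (mkTab blocks f).contains x = true := by
    rw [contains_mkTab]; simp [h]
  rw [PySem.Dict.items_insert_of_contains _ v hc, items_mkTab, items_mkTab, List.map_map]
  apply List.map_congr_left
  intro b _
  by_cases hb : b = x <;> simp [hb]

theorem modify_mkTab (blocks : List Int) (f : Int → PySem.Set Int) (x : Int)
    (h : x ∈ blocks) (d0 : PySem.Set Int) (g : PySem.Set Int → PySem.Set Int) :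
    (mkTab blocks f).modify x d0 g = mkTab blocks (fun b => if b = x then g (f b) else f b) := by
  show (mkTab blocks f).insert x (g ((mkTab blocks f).getD x d0)) = _
  rw [getD_mkTab blocks f x h d0, insert_mkTab blocks f x h]
  apply mkTab_congr
  intro b _
  by_cases hb : b = x <;> simp [hb]

-- The invariant of A's edge loop, with both dicts generalized to tables.
theorem loopA (blocks : List Int) : ∀ (es : List (Int × Int)) (P S : Int → PySem.Set Int),
    es.foldl
      (fun (st : PySem.Dict Int (PySem.Set Int) × PySem.Dict Int (PySem.Set Int)) e =>
        if st.2.contains e.1 && st.1.contains e.2 then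
          (st.1.modify e.2 PySem.Set.empty (fun s => PySem.Set.add s e.1),
           st.2.modify e.1 PySem.Set.empty (fun s => PySem.Set.add s e.2))
        else st)
      (mkTab blocks P, mkTab blocks S)
    = (mkTab blocks (fun b => PySem.Set.update (P b)
         (((es.filter (fun e => decide (e.1 ∈ blocks) && decide (e.2 ∈ blocks))).filter
            (fun e => e.2 == b)).map (·.1))),
       mkTab blocks (fun b => PySem.Set.update (S b)
         (((es.filter (fun e => decide (e.1 ∈ blocks) && decide (e.2 ∈ blocks))).filter
            (fun e => e.1 == b)).map (·.2)))) := by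
  intro es
  induction es with
  | nil =>
    intro P S
    simp only [List.foldl_nil, List.filter_nil, List.map_nil]
    refine Prod.ext ?_ ?_ <;> simp
  | cons e es ih =>
    intro P S
    simp only [List.foldl_cons]
    rw [contains_mkTab blocks S e.1, contains_mkTab blocks P e.2]
    by_cases h1 : e.1 ∈ blocks
    · by_cases h2 : e.2 ∈ blocks
      · simp only [h1, h2, decide_true, Bool.and_self, if_true]
        rw [modify_mkTab blocks P e.2 h2, modify_mkTab blocks S e.1 h1, ih]
        have hf : (List.filter (fun e => decide (e.1 ∈ blocks) && decide (e.2 ∈ blocks)) (e :: es))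
            = e :: List.filter (fun e => decide (e.1 ∈ blocks) && decide (e.2 ∈ blocks)) es := by
          simp [h1, h2]
        rw [hf]
        refine Prod.ext ?_ ?_
        · simp only
          apply mkTab_congr
          intro b _
          by_cases hb : e.2 = b
          · simp [hb, PySem.Set.update_cons]
          · have h1b : (e.2 == b) = false := by simp [hb]
            have hb' : ¬ b = e.2 := fun hh => hb hh.symm
            simp [h1b, hb']
        · simp only
          apply mkTab_congr
          intro b _
          by_cases hb : e.1 = b
          · simp [hb, PySem.Set.update_cons]
          · have h1b : (e.1 == b) = false := by simp [hb]
            have hb' : ¬ b = e.1 := fun hh => hb hh.symm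
            simp [h1b, hb']
      · simp only [h2, decide_false, Bool.and_false, Bool.false_eq_true, if_false]
        rw [ih]
        have hf : (List.filter (fun e => decide (e.1 ∈ blocks) && decide (e.2 ∈ blocks)) (e :: es))
            = List.filter (fun e => decide (e.1 ∈ blocks) && decide (e.2 ∈ blocks)) es := by
          simp [h2]
        rw [hf]
    · simp only [h1, decide_false, Bool.false_and, Bool.false_eq_true, if_false]
      rw [ih]
      have hf : (List.filter (fun e => decide (e.1 ∈ blocks) && decide (e.2 ∈ blocks)) (e :: es))
          = List.filter (fun e => decide (e.1 ∈ blocks) && decide (e.2 ∈ blocks)) es := by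
        simp [h1]
      rw [hf]

theorem setContains_ofList (xs : List Int) (x : Int) :
    PySem.Set.contains (PySem.Set.ofList xs) x = decide (x ∈ xs) := by
  by_cases h : x ∈ xs
  · simp [h, (PySem.Set.mem_ofList xs x).2 h]
  · simp only [h, decide_false]
    rw [← Bool.not_eq_true, PySem.Set.contains_iff]
    intro hm; exact h ((PySem.Set.mem_ofList xs x).1 hm)

-- ===== VERDICT (by name: the statement is the Claim_ definition above) =====
theorem build_cfg_py_spec : Claim_equal_build_cfg_py := by
  intro blocks edges _
  unfold Spec_build_cfg_py build_cfg_py build_cfg_py_alt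
  simp only
  have hinit : ∀ (u : Unit), blocks.foldl (fun d b => d.insert b PySem.Set.empty) PySem.Dict.empty
      = mkTab blocks (fun _ => PySem.Set.empty) := fun _ => rfl
  rw [hinit (), loopA blocks edges (fun _ => PySem.Set.empty) (fun _ => PySem.Set.empty)]
  have hvalid : edges.filter (fun e => PySem.Set.contains (PySem.Set.ofList blocks) e.1
        && PySem.Set.contains (PySem.Set.ofList blocks) e.2)
      = edges.filter (fun e => decide (e.1 ∈ blocks) && decide (e.2 ∈ blocks)) := by
    apply List.filter_congr
    intro e _
    rw [setContains_ofList, setContains_ofList]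
  refine Prod.ext ?_ ?_
  · simp only
    rw [hvalid]
    exact congrArg PySem.Dict.items
      (mkTab_congr _ _ _ (fun b _ => PySem.Set.update_nil_left _))
  · simp only
    rw [hvalid]
    exact congrArg PySem.Dict.items
      (mkTab_congr _ _ _ (fun b _ => PySem.Set.update_nil_left _))
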